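-- pv_equiv track=rewrite | github.com/licekto/challenges | advent-of-code/2024/python/advent_of_code/day_17.py | try_merge
-- ===== SOURCE A (Python) =====
-- def try_merge(s1, s2):
--     new = []
--     for i in range(len(s1)):
--         if s1[i] == s2[i]:
--             new.append(s1[i])
--         elif s1[i] == '.' and s2[i] != '.':
--             new.append(s2[i])
--         elif s1[i] != '.' and s2[i] == '.':
--             new.append(s1[i])
--         else:
--             return []
--     return new
-- ===== SOURCE B (Python) =====
-- def merge_range(s1, s2, lo, hi):
--     # Merge indices [lo, hi) by divide and conquer; None signals a conflict.
--     if lo >= hi: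
--         return []
--     if hi == lo + 1:
--         a, b = s1[lo], s2[lo]
--         if a == '.':
--             return [b]
--         if b == '.' or a == b:
--             return [a]
--         return None
--     mid = (lo + hi) // 2
--     left = merge_range(s1, s2, lo, mid)
--     if left is None:
--         return None
--     right = merge_range(s1, s2, mid, hi)
--     if right is None:
--         return None
--     return left + right
--
-- def try_merge(s1, s2):
--     r = merge_range(s1, s2, 0, len(s1))
--     return r if r is not None else []
-- ===== Notes on version B (the rewrite author's own statement) =====
-- stated objective: alternative
-- what changed: A's single left-to-right append-or-early-return loop is replaced by a divide-and-conquer recursion that merges the two halves of the index range independently (Option result, halves concatenated), with conflict signalled by None instead of an early return.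
import Mathlib
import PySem

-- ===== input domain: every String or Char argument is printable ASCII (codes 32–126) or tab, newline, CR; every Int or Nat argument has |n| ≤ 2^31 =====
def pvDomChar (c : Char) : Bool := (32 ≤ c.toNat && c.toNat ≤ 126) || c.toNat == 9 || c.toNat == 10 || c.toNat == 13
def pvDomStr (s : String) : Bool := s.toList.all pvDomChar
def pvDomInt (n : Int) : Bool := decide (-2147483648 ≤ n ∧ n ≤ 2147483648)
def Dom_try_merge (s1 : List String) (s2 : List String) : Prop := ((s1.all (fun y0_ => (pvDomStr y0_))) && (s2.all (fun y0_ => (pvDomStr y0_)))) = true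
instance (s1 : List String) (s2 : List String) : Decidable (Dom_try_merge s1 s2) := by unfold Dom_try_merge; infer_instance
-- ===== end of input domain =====

-- B replaces A's single left-to-right append-or-early-return loop by a divide-and-conquer
-- recursion merging the two halves of the index range, None/none signalling a conflict
-- (alternative decomposition, same asymptotic cost).

-- ===== PORT A =====
-- loop over i in range(len(s1)) with accumulator `acc`; s2[i] out of range = IndexError (excluded by Pre_)
def tryMergeLoopA (s1 s2 : List String) (i : Nat) (acc : List String) : List String :=
  if h : i < s1.length then
    match s2[i]? with
    | none => []   -- Python raises IndexError here; outside Pre_try_merge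
    | some b =>
      let a := s1[i]'h
      if a = b then tryMergeLoopA s1 s2 (i+1) (acc ++ [a])
      else if a = "." ∧ b ≠ "." then tryMergeLoopA s1 s2 (i+1) (acc ++ [b])
      else if a ≠ "." ∧ b = "." then tryMergeLoopA s1 s2 (i+1) (acc ++ [a])
      else []
  else acc
termination_by s1.length - i

def try_merge (s1 : List String) (s2 : List String) : List String :=
  tryMergeLoopA s1 s2 0 []

-- ===== PORT B =====
-- divide-and-conquer merge of the index range [lo, hi); none = conflict
def mergeRange (s1 s2 : List String) (lo hi : Nat) : Option (List String) :=
  if hi ≤ lo then some []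
  else if h1 : hi = lo + 1 then
    match s1[lo]?, s2[lo]? with
    | some a, some b =>
      if a = "." then some [b]
      else if b = "." ∨ a = b then some [a]
      else none
    | _, _ => none   -- Python raises IndexError here; outside Pre_try_merge
  else
    let mid := (lo + hi) / 2
    match mergeRange s1 s2 lo mid with
    | none => none
    | some left =>
      match mergeRange s1 s2 mid hi with
      | none => none
      | some right => some (left ++ right)
termination_by hi - lo
decreasing_by all_goals omega

def try_merge_alt (s1 : List String) (s2 : List String) : List String :=
  match mergeRange s1 s2 0 s1.length with
  | some r => r
  | none => []

-- ===== PRECONDITION & SPEC =====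
-- Pre_ excludes exactly the inputs where Python A raises IndexError: s2 is exhausted
-- before the loop ends or returns early at a conflict.
def Pre_try_merge (s1 : List String) (s2 : List String) : Prop :=
  s1.length ≤ s2.length ∨
    ∃ j, j < s1.length ∧ j < s2.length ∧
      s1.getD j "" ≠ s2.getD j "" ∧ s1.getD j "" ≠ "." ∧ s2.getD j "" ≠ "."
instance (s1 : List String) (s2 : List String) : Decidable (Pre_try_merge s1 s2) := by unfold Pre_try_merge; infer_instance
def pvWitness_try_merge : List String × List String := (["a", ".", "c"], [".", "b", "c"])

def Spec_try_merge (s1 : List String) (s2 : List String) (out : List String) : Prop := out = try_merge_alt s1 s2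
instance (s1 : List String) (s2 : List String) (out : List String) : Decidable (Spec_try_merge s1 s2 out) := by unfold Spec_try_merge; infer_instance

-- ===== CLAIM (what is proved, stated in full; the proofs are below) =====
def Claim_equal_try_merge : Prop := ∀ (s1 : List String) (s2 : List String), Dom_try_merge s1 s2 → Pre_try_merge s1 s2 → Spec_try_merge s1 s2 (try_merge s1 s2)

-- ===== LEMMAS AND PROOFS =====

def tryMergeConflict (s1 s2 : List String) (i : Nat) : Bool :=
  s1.getD i "" != s2.getD i "" && s1.getD i "" != "." && s2.getD i "" != "."

def tryMergePick (s1 s2 : List String) (i : Nat) : String :=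
  if s1.getD i "" != "." then s1.getD i "" else s2.getD i ""

-- Invariant for A's loop: from index i (with k = len - i remaining), the loop returns
-- [] iff some remaining index conflicts, else acc ++ the picked values of the remaining indices.
lemma tryMergeLoopA_eq (s1 s2 : List String) (hp : s1.length ≤ s2.length) :
    ∀ (k i : Nat) (acc : List String), i + k = s1.length →
    tryMergeLoopA s1 s2 i acc =
      if (List.range' i k).any (tryMergeConflict s1 s2) then []
      else acc ++ (List.range' i k).map (tryMergePick s1 s2) := by
  intro k
  induction k with
  | zero =>
    intro i acc h
    unfold tryMergeLoopA
    simp [show ¬ i < s1.length by omega]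
  | succ k ih =>
    intro i acc h
    have hi1 : i < s1.length := by omega
    have hi2 : i < s2.length := by omega
    have hga : s1[i]? = some (s1[i]'hi1) := List.getElem?_eq_getElem hi1
    have hgb : s2[i]? = some (s2[i]'hi2) := List.getElem?_eq_getElem hi2
    unfold tryMergeLoopA
    rw [List.range'_succ]
    simp only [hi1, dif_pos, List.getElem?_eq_getElem hi2, List.any_cons, List.map_cons]
    set a := s1[i]'hi1 with ha
    set b := s2[i]'hi2 with hb
    have hrec : ∀ acc', tryMergeLoopA s1 s2 (i+1) acc' =
        if (List.range' (i+1) k).any (tryMergeConflict s1 s2) then []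
        else acc' ++ (List.range' (i+1) k).map (tryMergePick s1 s2) := by
      intro acc'; exact ih (i+1) acc' (by omega)
    by_cases hab : a = b
    · have hc : tryMergeConflict s1 s2 i = false := by
        simp [tryMergeConflict, List.getD, hga, hgb, hab]
      have hpick : tryMergePick s1 s2 i = a := by
        by_cases hd : a = "." <;> simp [tryMergePick, List.getD, hga, hgb, ← hab, hd]
      rw [if_pos hab, hrec, hc, hpick]
      by_cases hrest : (List.range' (i+1) k).any (tryMergeConflict s1 s2) = true <;>
        simp [hrest]
    · rw [if_neg hab]
      by_cases hda : a = "."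
      · have hdb : b ≠ "." := fun hh => hab (hda.trans hh.symm)
        have hc : tryMergeConflict s1 s2 i = false := by
          simp [tryMergeConflict, List.getD, hga, hgb, hda]
        have hpick : tryMergePick s1 s2 i = b := by
          simp [tryMergePick, List.getD, hga, hgb, hda]
        rw [if_pos ⟨hda, hdb⟩, hrec, hc, hpick]
        by_cases hrest : (List.range' (i+1) k).any (tryMergeConflict s1 s2) = true <;>
          simp [hrest]
      · by_cases hdb : b = "."
        · have hc : tryMergeConflict s1 s2 i = false := by
            simp [tryMergeConflict, List.getD, hga, hgb, hdb]
          have hpick : tryMergePick s1 s2 i = a := by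
            simp [tryMergePick, List.getD, hga, hda]
          rw [if_neg (fun hh => hda hh.1), if_pos ⟨hda, hdb⟩, hrec, hc, hpick]
          by_cases hrest : (List.range' (i+1) k).any (tryMergeConflict s1 s2) = true <;>
            simp [hrest]
        · have hc : tryMergeConflict s1 s2 i = true := by
            simp [tryMergeConflict, List.getD, hga, hgb, hab, hda, hdb]
          rw [if_neg (fun hh => hda hh.1), if_neg (fun hh => hdb hh.2), hc]
          simp

-- If some index j (within both lists) conflicts, A's loop returns [] from any start i ≤ j.
lemma tryMergeLoopA_conflict (s1 s2 : List String) (j : Nat) (hj1 : j < s1.length)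
    (hj2 : j < s2.length) (hc : tryMergeConflict s1 s2 j = true) :
    ∀ (k i : Nat) (acc : List String), i + k = j → tryMergeLoopA s1 s2 i acc = [] := by
  intro k
  induction k with
  | zero =>
    intro i acc h
    subst h
    simp only [Nat.add_zero] at *
    have hga : s1[i]? = some (s1[i]'hj1) := List.getElem?_eq_getElem hj1
    have hgb : s2[i]? = some (s2[i]'hj2) := List.getElem?_eq_getElem hj2
    simp only [tryMergeConflict, List.getD, hga, hgb, Option.getD_some, bne_iff_ne,
      Bool.and_eq_true, ne_eq] at hc
    unfold tryMergeLoopA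
    simp only [hj1, dif_pos, hgb]
    rw [if_neg hc.1.1, if_neg (fun hh => hc.1.2 hh.1), if_neg (fun hh => hc.2 hh.2)]
  | succ k ih =>
    intro i acc h
    have hi1 : i < s1.length := by omega
    have hi2 : i < s2.length := by omega
    unfold tryMergeLoopA
    simp only [hi1, dif_pos, List.getElem?_eq_getElem hi2]
    split_ifs <;> first | rfl | exact ih (i+1) _ (by omega)

lemma range'_glue (a b c : Nat) (h1 : a ≤ b) (h2 : b ≤ c) :
    List.range' a (b - a) ++ List.range' b (c - b) = List.range' a (c - a) := by
  obtain ⟨m, rfl⟩ : ∃ m, b = a + m := ⟨b - a, by omega⟩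
  obtain ⟨k, rfl⟩ : ∃ k, c = a + m + k := ⟨c - (a + m), by omega⟩
  rw [show a + m - a = m by omega, show a + m + k - (a + m) = k by omega,
    show a + m + k - a = m + k by omega]
  exact List.range'_append_1

-- B's recursion on a conflict-free in-range interval returns the picked values.
lemma mergeRange_ok (s1 s2 : List String) :
    ∀ (n lo hi : Nat), hi - lo ≤ n → hi ≤ s1.length → hi ≤ s2.length →
    (∀ j, lo ≤ j → j < hi → tryMergeConflict s1 s2 j = false) →
    mergeRange s1 s2 lo hi = some ((List.range' lo (hi - lo)).map (tryMergePick s1 s2)) := by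
  intro n
  induction n with
  | zero =>
    intro lo hi hn _ _ _
    unfold mergeRange
    simp [show hi ≤ lo by omega, show hi - lo = 0 by omega]
  | succ n ih =>
    intro lo hi hn h1 h2 hnc
    by_cases hle : hi ≤ lo
    · unfold mergeRange; simp [hle, show hi - lo = 0 by omega]
    · by_cases hone : hi = lo + 1
      · subst hone
        have hlo1 : lo < s1.length := by omega
        have hlo2 : lo < s2.length := by omega
        have hga : s1[lo]? = some (s1[lo]'hlo1) := List.getElem?_eq_getElem hlo1
        have hgb : s2[lo]? = some (s2[lo]'hlo2) := List.getElem?_eq_getElem hlo2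
        have hc := hnc lo (le_refl _) (by omega)
        simp only [tryMergeConflict, List.getD, hga, hgb, Option.getD_some] at hc
        unfold mergeRange
        simp only [show ¬ (lo + 1 ≤ lo) by omega, if_false, dif_pos rfl, hga, hgb,
          show lo + 1 - lo = 1 by omega]
        simp only [List.range'_one, List.map_cons, List.map_nil]
        set a := s1[lo]'hlo1
        set b := s2[lo]'hlo2
        by_cases hda : a = "."
        · simp [hda, tryMergePick, List.getD, hga, hgb]
        · have hcase : b = "." ∨ a = b := by
            by_cases hab : a = b
            · exact Or.inr hab
            · by_cases hdb : b = "."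
              · exact Or.inl hdb
              · have ht : (a != b && a != "." && b != ".") = true := by
                  simp [bne_iff_ne, hab, hda, hdb]
                exact absurd (ht.symm.trans hc) (by decide)
          rw [if_neg hda, if_pos hcase]
          simp [tryMergePick, List.getD, hga, hda]
      · have h2lo : lo + 2 ≤ hi := by omega
        have hmid1 : lo < (lo + hi) / 2 := by omega
        have hmid2 : (lo + hi) / 2 < hi := by omega
        unfold mergeRange
        simp only [hle, if_false, hone, dif_neg]
        rw [ih lo ((lo + hi) / 2) (by omega) (by omega) (by omega)
              (fun j hj1 hj2 => hnc j hj1 (by omega)),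
            ih ((lo + hi) / 2) hi (by omega) h1 h2
              (fun j hj1 hj2 => hnc j (by omega) hj2)]
        simp only [dif_neg not_false]
        rw [← List.map_append, range'_glue lo ((lo + hi) / 2) hi (by omega) (by omega)]

-- B's recursion returns none as soon as the interval contains an in-range conflict.
lemma mergeRange_conflict (s1 s2 : List String) :
    ∀ (n lo hi : Nat), hi - lo ≤ n →
    (∃ j, lo ≤ j ∧ j < hi ∧ j < s1.length ∧ j < s2.length ∧ tryMergeConflict s1 s2 j = true) →
    mergeRange s1 s2 lo hi = none := by
  intro n
  induction n with
  | zero =>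
    intro lo hi hn ⟨j, hj1, hj2, _⟩
    omega
  | succ n ih =>
    intro lo hi hn ⟨j, hj1, hj2, hj3, hj4, hc⟩
    have hle : ¬ hi ≤ lo := by omega
    by_cases hone : hi = lo + 1
    · have hjlo : j = lo := by omega
      subst hjlo
      have hga : s1[j]? = some (s1[j]'hj3) := List.getElem?_eq_getElem hj3
      have hgb : s2[j]? = some (s2[j]'hj4) := List.getElem?_eq_getElem hj4
      simp only [tryMergeConflict, List.getD, hga, hgb, Option.getD_some, Bool.and_eq_true,
        bne_iff_ne, ne_eq] at hc
      subst hone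
      unfold mergeRange
      simp only [show ¬ (j + 1 ≤ j) by omega, if_false, dif_pos rfl, hga, hgb]
      rw [if_neg hc.1.2, if_neg (by rintro (hb | hab); exact hc.2 hb; exact hc.1.1 hab)]
      simp
    · unfold mergeRange
      simp only [hle, if_false, hone, dif_neg]
      have hmid1 : lo < (lo + hi) / 2 := by omega
      have hmid2 : (lo + hi) / 2 < hi := by omega
      by_cases hjm : j < (lo + hi) / 2
      · rw [ih lo ((lo + hi) / 2) (by omega) ⟨j, hj1, hjm, hj3, hj4, hc⟩]
        simp
      · rw [ih ((lo + hi) / 2) hi (by omega) ⟨j, by omega, hj2, hj3, hj4, hc⟩]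
        simp only [dif_neg not_false]
        cases mergeRange s1 s2 lo ((lo + hi) / 2) <;> rfl

-- ===== VERDICT (by name: the statement is the Claim_ definition above) =====
theorem try_merge_spec : Claim_equal_try_merge := by
  intro s1 s2 _ hp
  unfold Spec_try_merge try_merge try_merge_alt
  by_cases hle : s1.length ≤ s2.length
  · rw [tryMergeLoopA_eq s1 s2 hle s1.length 0 [] (by omega)]
    by_cases hconf : ∃ j, j < s1.length ∧ tryMergeConflict s1 s2 j = true
    · obtain ⟨j, hj, hc⟩ := hconf
      rw [mergeRange_conflict s1 s2 s1.length 0 s1.length (by omega)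
            ⟨j, by omega, hj, hj, by omega, hc⟩]
      rw [if_pos (List.any_eq_true.mpr ⟨j, by simp [List.mem_range']; omega, hc⟩)]
    · push_neg at hconf
      rw [mergeRange_ok s1 s2 s1.length 0 s1.length (by omega) (le_refl _) hle
            (fun j _ hj2 => by simpa using hconf j hj2)]
      rw [if_neg]
      · simp
      · simp only [List.any_eq_true, not_exists, not_and]
        intro j hj
        have hjlt : j < s1.length := by
          simp [List.mem_range'] at hj; omega
        exact hconf j hjlt
  · rcases hp with hp | ⟨j, hj1, hj2, hcc⟩
    · exact absurd hp hle
    · have hc : tryMergeConflict s1 s2 j = true := by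
        simp only [tryMergeConflict, bne_iff_ne, Bool.and_eq_true, ne_eq]
        exact ⟨⟨hcc.1, hcc.2.1⟩, hcc.2.2⟩
      rw [tryMergeLoopA_conflict s1 s2 j hj1 hj2 hc j 0 [] (by omega),
          mergeRange_conflict s1 s2 s1.length 0 s1.length (by omega)
            ⟨j, by omega, hj1, hj1, hj2, hc⟩]
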